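-- pv_equiv track=rewrite | github.com/iiro33/advent_of_code_2022 | day_3.py | calc_priorities
-- ===== SOURCE A (Python) =====
-- def get_points(char):
--     if char.isupper():
--         return ord(char) - 38
--     else:
--         return ord(char) - 96
--
-- def calc_priorities(p1, p2):
--     string_prio = 0
--     added_list = []
--     for char in p1:
--         if char in p2 and char not in added_list:
--             added_list.append(char)
--             string_prio += get_points(char)
--     return string_prio
-- ===== SOURCE B (Python) =====
-- def get_points(char):
--     if char.isupper():
--         return ord(char) - 38
--     else:
--         return ord(char) - 96
--
-- def calc_priorities(p1, p2):
--     common = set(p1) & set(p2)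
--     return sum(get_points(c) for c in common)
-- ===== Notes on version B (the rewrite author's own statement) =====
-- stated objective: simpler
-- what changed: Replaces the scan of p1 with a manually maintained seen-list (quadratic membership tests) by building the two character sets once and summing get_points over their intersection.
import Mathlib
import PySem

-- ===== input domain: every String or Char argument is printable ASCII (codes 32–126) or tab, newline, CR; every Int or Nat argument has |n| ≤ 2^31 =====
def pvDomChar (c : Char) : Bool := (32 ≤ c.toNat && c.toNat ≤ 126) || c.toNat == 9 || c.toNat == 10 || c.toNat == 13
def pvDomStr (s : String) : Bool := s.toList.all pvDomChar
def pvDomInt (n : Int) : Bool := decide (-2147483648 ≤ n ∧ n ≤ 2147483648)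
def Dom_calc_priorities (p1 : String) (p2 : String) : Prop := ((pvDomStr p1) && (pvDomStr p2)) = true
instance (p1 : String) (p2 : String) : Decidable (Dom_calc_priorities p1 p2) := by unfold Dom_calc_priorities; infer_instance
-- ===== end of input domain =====

-- B is a simpler re-implementation: it sums get_points over the intersection of the two
-- character sets instead of scanning p1 while maintaining a seen-list; return values proved equal.

-- ===== PORT A =====
def get_points (c : Char) : Int :=
  if PySem.Chars.isupper c then (c.toNat : Int) - 38 else (c.toNat : Int) - 96

def calc_priorities (p1 : String) (p2 : String) : Int :=
  (p1.toList.foldl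
    (fun (st : Int × List Char) c =>
      if c ∈ p2.toList ∧ ¬ c ∈ st.2 then (st.1 + get_points c, st.2 ++ [c]) else st)
    (0, [])).1

-- ===== PORT B =====
def calc_priorities_alt (p1 : String) (p2 : String) : Int :=
  -- common = set(p1) & set(p2); sum over it is order-independent, so the Set's list order is exact
  let common : PySem.Set Char :=
    PySem.Set.inter (PySem.Set.ofList p1.toList) (PySem.Set.ofList p2.toList)
  common.foldl (fun acc c => acc + get_points c) 0

-- ===== PRECONDITION & SPEC =====
def Spec_calc_priorities (p1 : String) (p2 : String) (out : Int) : Prop := out = calc_priorities_alt p1 p2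
instance (p1 : String) (p2 : String) (out : Int) : Decidable (Spec_calc_priorities p1 p2 out) := by unfold Spec_calc_priorities; infer_instance

-- ===== CLAIM (what is proved, stated in full; the proofs are below) =====
def Claim_equal_calc_priorities : Prop := ∀ (p1 : String) (p2 : String), Dom_calc_priorities p1 p2 → Spec_calc_priorities p1 p2 (calc_priorities p1 p2)

-- ===== LEMMAS AND PROOFS =====

-- the list of characters A appends to added_list while scanning cs, with seen already added
def pvNew (p2l : List Char) : List Char → List Char → List Char
  | [], _ => []
  | c :: cs, seen =>
      if c ∈ p2l ∧ ¬ c ∈ seen then c :: pvNew p2l cs (seen ++ [c]) else pvNew p2l cs seen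

lemma loopA_eq (p2l : List Char) :
    ∀ (cs : List Char) (acc : Int) (seen : List Char),
      (cs.foldl
        (fun (st : Int × List Char) c =>
          if c ∈ p2l ∧ ¬ c ∈ st.2 then (st.1 + get_points c, st.2 ++ [c]) else st)
        (acc, seen)).1
      = acc + ((pvNew p2l cs seen).map get_points).sum := by
  intro cs
  induction cs with
  | nil => intro acc seen; simp [pvNew]
  | cons c cs ih =>
      intro acc seen
      by_cases h : c ∈ p2l ∧ ¬ c ∈ seen
      · simp only [List.foldl_cons, if_pos h, pvNew, ih, List.map_cons, List.sum_cons]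
        ring
      · simp only [List.foldl_cons, if_neg h, pvNew, ih]

-- (ofList cs).filter (∉ seen) satisfies the same recursion as the seen-relative dedup
lemma filter_ofList_cons (cs : List Char) (seen : List Char) (c : Char) :
    (PySem.Set.ofList (c :: cs)).filter (fun x => decide (¬ x ∈ seen))
      = if c ∈ seen then (PySem.Set.ofList cs).filter (fun x => decide (¬ x ∈ seen))
        else c :: (PySem.Set.ofList cs).filter (fun x => decide (¬ x ∈ seen ++ [c])) := by
  rw [PySem.Set.ofList_cons]
  by_cases hc : c ∈ seen
  · rw [if_pos hc, List.filter_cons, if_neg (by simp [hc])]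
    simp only [PySem.Set.discard, List.filter_filter]
    apply List.filter_congr
    intro x _
    by_cases hx : x = c
    · subst hx; simp [hc]
    · simp [hx]
  · rw [if_neg hc, List.filter_cons, if_pos (by simp [hc])]
    simp only [PySem.Set.discard, List.filter_filter]
    congr 1
    apply List.filter_congr
    intro x _
    by_cases hx : x = c
    · subst hx; simp
    · simp [hx, List.mem_append]

lemma pvNew_eq_filter (p2l : List Char) :
    ∀ (cs seenL seenD : List Char),
      (∀ c ∈ p2l, (c ∈ seenD ↔ c ∈ seenL)) →
      pvNew p2l cs seenL
        = ((PySem.Set.ofList cs).filter (fun x => decide (¬ x ∈ seenD))).filter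
            (fun c => decide (c ∈ p2l)) := by
  intro cs
  induction cs with
  | nil => intro seenL seenD _; simp [pvNew, PySem.Set.ofList_nil]
  | cons c cs ih =>
      intro seenL seenD hco
      rw [filter_ofList_cons]
      by_cases hp : c ∈ p2l
      · have hd : c ∈ seenD ↔ c ∈ seenL := hco c hp
        by_cases hL : c ∈ seenL
        · rw [if_pos (hd.mpr hL)]
          simp only [pvNew]
          rw [if_neg (by simp [hL])]
          exact ih seenL seenD hco
        · rw [if_neg (fun h => hL (hd.mp h))]
          simp only [pvNew]
          rw [if_pos ⟨hp, hL⟩, List.filter_cons, if_pos (by simp [hp])]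
          congr 1
          apply ih
          intro d hdp
          simp only [List.mem_append, List.mem_singleton, hco d hdp]
      · by_cases hD : c ∈ seenD
        · rw [if_pos hD]
          simp only [pvNew]
          rw [if_neg (by simp [hp])]
          exact ih seenL seenD hco
        · rw [if_neg hD]
          simp only [pvNew]
          rw [if_neg (by simp [hp]), List.filter_cons, if_neg (by simp [hp])]
          apply ih
          intro d hdp
          have hne : d ≠ c := fun h => hp (h ▸ hdp)
          simp [List.mem_append, hco d hdp, hne]

lemma foldl_sum (l : List Char) (a : Int) :
    l.foldl (fun acc c => acc + get_points c) a = a + (l.map get_points).sum := by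
  induction l generalizing a with
  | nil => simp
  | cons c cs ih => simp [ih]; ring

-- ===== VERDICT (by name: the statement is the Claim_ definition above) =====
theorem calc_priorities_spec : Claim_equal_calc_priorities := by
  intro p1 p2 _
  unfold Spec_calc_priorities calc_priorities calc_priorities_alt
  rw [loopA_eq p2.toList p1.toList 0 [], foldl_sum, zero_add, zero_add,
    pvNew_eq_filter p2.toList p1.toList [] [] (fun _ _ => Iff.rfl)]
  congr 1
  have h1 : (PySem.Set.ofList p1.toList).filter (fun x => decide (¬ x ∈ ([] : List Char)))
      = PySem.Set.ofList p1.toList := by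
    apply List.filter_eq_self.mpr; intro x _; simp
  rw [h1]
  have h2 : PySem.Set.inter (PySem.Set.ofList p1.toList) (PySem.Set.ofList p2.toList)
      = (PySem.Set.ofList p1.toList).filter (fun c => decide (c ∈ p2.toList)) := by
    simp only [PySem.Set.inter]
    apply List.filter_congr
    intro x _
    simp [PySem.Set.contains, PySem.Set.mem_ofList]
  rw [h2]
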